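-- pv_equiv track=rewrite | github.com/niepenghai/redactor | config/patterns.py | is_balance_amount
-- ===== SOURCE A (Python) =====
-- _BALANCE_KEYWORDS = [
--     'beginning balance:', 'ending balance:', 'available balance:',
--     'current balance:', 'account balance:', 'total balance:',
--     'statement balance:', 'opening balance:', 'closing balance:',
--     'beginning balance ', 'ending balance ', 'available balance ',
--     'current balance ', 'account balance ', 'total balance ',
--     'statement balance ', 'opening balance ', 'closing balance ',
--     # Add keywords without colon/space for multi-line formats
--     'beginning balance', 'ending balance', 'available balance',
--     'current balance', 'account balance', 'total balance',
--     'statement balance', 'opening balance', 'closing balance'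
-- ]
--
-- def is_balance_amount(text: str, start_pos: int, full_text: str) -> bool:
--     """
--     Check if a currency match is a balance amount that should be preserved.
--     Optimized version with reduced string operations.
--
--     Args:
--         text: The matched currency text
--         start_pos: Starting position of the match in full_text
--         full_text: The complete text being processed
--
--     Returns:
--         True if this is a balance amount that should not be redacted
--     """
--     # Quick optimization: get smaller context first (50 chars instead of 200)
--     context_start = max(0, start_pos - 50)
--     before_context = full_text[context_start:start_pos].lower()
--
--     # Quick check with short context first
--     for keyword in _BALANCE_KEYWORDS:
--         if keyword in before_context:
--             return True
--
--     # Only do expensive line-based check if quick check failed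
--     # Get current line context
--     line_start = full_text.rfind('\n', 0, start_pos) + 1
--     line_end = full_text.find('\n', start_pos + len(text))
--     if line_end == -1:
--         line_end = len(full_text)
--
--     # Only check line if it's different from what we already checked
--     if line_start < context_start:
--         line_context = full_text[line_start:start_pos].lower()
--         amount_pos_in_line = start_pos - line_start
--
--         for keyword in _BALANCE_KEYWORDS:
--             keyword_pos = line_context.find(keyword)
--             if keyword_pos != -1 and keyword_pos < amount_pos_in_line:
--                 return True
--
--     return False
-- ===== SOURCE B (Python) =====
-- _BALANCE_KEYWORDS = [
--     'beginning balance:', 'ending balance:', 'available balance:',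
--     'current balance:', 'account balance:', 'total balance:',
--     'statement balance:', 'opening balance:', 'closing balance:',
--     'beginning balance ', 'ending balance ', 'available balance ',
--     'current balance ', 'account balance ', 'total balance ',
--     'statement balance ', 'opening balance ', 'closing balance ',
--     'beginning balance', 'ending balance', 'available balance',
--     'current balance', 'account balance', 'total balance',
--     'statement balance', 'opening balance', 'closing balance'
-- ]
--
-- def is_balance_amount(text: str, start_pos: int, full_text: str) -> bool:
--     # One pass: search a single region covering both A's 50-char window and
--     # the current-line extension; the find-position constraint is always true.
--     line_start = full_text.rfind('\n', 0, start_pos) + 1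
--     region_start = max(0, min(line_start, start_pos - 50))
--     context = full_text[region_start:start_pos].lower()
--     return any(kw in context for kw in _BALANCE_KEYWORDS)
-- ===== Notes on version B (the rewrite author's own statement) =====
-- stated objective: simpler
-- what changed: B replaces A's two-phase check (50-char window scan, then a gated current-line scan with a find-position test) by a single keyword search over one combined context region starting at max(0, min(line_start, start_pos-50)), relying on the facts that A's position constraint is always satisfied and that the short window is a suffix of the line region.
import Mathlib
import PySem

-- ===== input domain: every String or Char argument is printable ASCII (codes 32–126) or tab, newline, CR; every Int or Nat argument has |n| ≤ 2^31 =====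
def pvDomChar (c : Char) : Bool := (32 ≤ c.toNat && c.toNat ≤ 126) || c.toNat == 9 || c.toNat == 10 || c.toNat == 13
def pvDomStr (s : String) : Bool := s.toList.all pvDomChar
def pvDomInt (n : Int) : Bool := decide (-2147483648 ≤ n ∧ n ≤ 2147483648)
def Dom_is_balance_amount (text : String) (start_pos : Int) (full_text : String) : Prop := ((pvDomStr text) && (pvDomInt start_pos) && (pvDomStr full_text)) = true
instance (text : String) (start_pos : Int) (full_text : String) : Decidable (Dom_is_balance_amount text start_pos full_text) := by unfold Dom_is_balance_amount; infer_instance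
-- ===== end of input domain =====

-- B folds A's two-phase check (50-char window, then conditional current-line scan with an
-- always-true position constraint) into one keyword search over a single combined region: simpler.

def pvBalanceKeywords : List String := [
  "beginning balance:", "ending balance:", "available balance:",
  "current balance:", "account balance:", "total balance:",
  "statement balance:", "opening balance:", "closing balance:",
  "beginning balance ", "ending balance ", "available balance ",
  "current balance ", "account balance ", "total balance ",
  "statement balance ", "opening balance ", "closing balance ",
  "beginning balance", "ending balance", "available balance",
  "current balance", "account balance", "total balance",
  "statement balance", "opening balance", "closing balance"]

-- ===== PORT A =====
def is_balance_amount (text : String) (start_pos : Int) (full_text : String) : Bool :=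
  let context_start : Int := max 0 (start_pos - 50)
  let before_context : String := PySem.Str.lower (PySem.Str.slice full_text (some context_start) (some start_pos))
  -- for keyword in _BALANCE_KEYWORDS: if keyword in before_context: return True
  if pvBalanceKeywords.any (fun keyword => PySem.Str.isIn keyword before_context) then
    true
  else
    let line_start : Int := PySem.Str.rfindFrom full_text "\n" 0 (some start_pos) + 1
    let line_end₀ : Int := PySem.Str.findFrom full_text "\n" (start_pos + PySem.Str.len text)
    let _line_end : Int := if line_end₀ = -1 then PySem.Str.len full_text else line_end₀
    if line_start < context_start then
      let line_context : String := PySem.Str.lower (PySem.Str.slice full_text (some line_start) (some start_pos))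
      let amount_pos_in_line : Int := start_pos - line_start
      pvBalanceKeywords.any (fun keyword =>
        let keyword_pos : Int := PySem.Str.find line_context keyword
        keyword_pos != -1 && decide (keyword_pos < amount_pos_in_line))
    else
      false

-- ===== PORT B =====
def is_balance_amount_alt (text : String) (start_pos : Int) (full_text : String) : Bool :=
  let line_start : Int := PySem.Str.rfindFrom full_text "\n" 0 (some start_pos) + 1
  let region_start : Int := max 0 (min line_start (start_pos - 50))
  let context : String := PySem.Str.lower (PySem.Str.slice full_text (some region_start) (some start_pos))
  pvBalanceKeywords.any (fun kw => PySem.Str.isIn kw context)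

-- ===== PRECONDITION & SPEC =====
def Spec_is_balance_amount (text : String) (start_pos : Int) (full_text : String) (out : Bool) : Prop := out = is_balance_amount_alt text start_pos full_text
instance (text : String) (start_pos : Int) (full_text : String) (out : Bool) : Decidable (Spec_is_balance_amount text start_pos full_text out) := by unfold Spec_is_balance_amount; infer_instance

-- ===== CLAIM (what is proved, stated in full; the proofs are below) =====
def Claim_equal_is_balance_amount : Prop := ∀ (text : String) (start_pos : Int) (full_text : String), Dom_is_balance_amount text start_pos full_text → Spec_is_balance_amount text start_pos full_text (is_balance_amount text start_pos full_text)

-- ===== LEMMAS AND PROOFS =====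

theorem pv_any_congr_mem {α : Type} (l : List α) (p q : α → Bool)
    (h : ∀ a ∈ l, p a = q a) : l.any p = l.any q := by
  induction l with
  | nil => rfl
  | cons x xs ih => simp only [List.any_cons]; rw [h x (by simp), ih (fun a ha => h a (by simp [ha]))]

theorem pv_kw_ne_nil : ∀ kw ∈ pvBalanceKeywords, kw.toList ≠ [] := by decide

theorem pv_rfind_go_ge (s sub : List Char) (k : Nat) : -1 ≤ PySem.Chars.rfind.go s sub k := by
  induction k with
  | zero => simp [PySem.Chars.rfind.go]; split <;> omega
  | succ n ih => simp [PySem.Chars.rfind.go]; split <;> omega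

theorem pv_rfind_ge (s sub : List Char) : -1 ≤ PySem.Chars.rfind s sub :=
  pv_rfind_go_ge s sub s.length

theorem pv_rfindFrom_ge (s sub : List Char) (e : Option Int) :
    -1 ≤ PySem.Chars.rfindFrom s sub 0 e := by
  simp only [PySem.Chars.rfindFrom]
  norm_num
  repeat' split
  all_goals try omega
  all_goals exact pv_rfind_ge _ _

theorem pv_isIn_of_isIn_drop (kw l : List Char) (d : Nat)
    (h : PySem.Chars.isIn kw (l.drop d) = true) : PySem.Chars.isIn kw l = true := by
  rw [PySem.Chars.isIn_iff_infix] at h ⊢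
  exact h.trans (List.drop_suffix d l).isInfix

theorem pv_find_cond (kw l : List Char) (apl : Int) (hk : kw ≠ []) (hl : (l.length : Int) ≤ apl) :
    ((PySem.Chars.find l kw != -1) && decide (PySem.Chars.find l kw < apl))
      = PySem.Chars.isIn kw l := by
  by_cases h : PySem.Chars.find l kw = -1
  · simp [PySem.Chars.isIn_eq_false_iff, ← PySem.Chars.find_eq_neg_one_iff, h]
  · have h0 : 0 ≤ PySem.Chars.find l kw := by
      have := PySem.Chars.neg_one_le_find l kw; omega
    obtain ⟨hp, -⟩ := PySem.Chars.find_spec h0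
    have hlen : kw.length ≤ (l.drop (PySem.Chars.find l kw).toNat).length := hp.length_le
    rw [List.length_drop] at hlen
    have hk1 : 1 ≤ kw.length := List.length_pos_iff.mpr hk
    have hlt : PySem.Chars.find l kw < apl := by
      have := Int.toNat_of_nonneg h0
      omega
    have hin : PySem.Chars.isIn kw l = true := by
      rw [PySem.Chars.isIn_iff_infix]
      exact (PySem.Chars.find_ne_neg_one_iff l kw).mp h
    simp [h, hlt, hin]

theorem is_balance_amount_eq_alt (text : String) (start_pos : Int) (full_text : String) :
    is_balance_amount text start_pos full_text = is_balance_amount_alt text start_pos full_text := by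
  have hls : -1 ≤ PySem.Str.rfindFrom full_text "\n" 0 (some start_pos) := by
    rw [PySem.Str.rfindFrom_eq]; exact pv_rfindFrom_ge _ _ _
  simp only [is_balance_amount, is_balance_amount_alt]
  set L : Int := PySem.Str.rfindFrom full_text "\n" 0 (some start_pos) with hL
  by_cases hcase : L + 1 < max 0 (start_pos - 50)
  · -- line check runs; region is the line start
    have h50 : 50 < start_pos := by omega
    have hcs : max 0 (start_pos - 50) = start_pos - 50 := by omega
    have hrs : max 0 (min (L + 1) (start_pos - 50)) = L + 1 := by omega
    rw [hrs, if_pos hcase, hcs]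
    have hlen : (((PySem.Str.lower (PySem.Str.slice full_text (some (L+1)) (some start_pos))).toList.length : Int)) ≤ start_pos - (L + 1) := by
      rw [PySem.Str.toList_lower, PySem.Str.toList_slice, PySem.Chars.slice_eq_listSlice,
          PySem.List.slice_toNat _ (by omega) (by omega), PySem.Chars.lower]
      simp only [List.length_map, List.length_take, List.length_drop]
      omega
    have hdrop : (PySem.Str.lower (PySem.Str.slice full_text (some (start_pos-50)) (some start_pos))).toList
        = ((PySem.Str.lower (PySem.Str.slice full_text (some (L+1)) (some start_pos))).toList).drop ((start_pos-50).toNat - (L+1).toNat) := by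
      rw [PySem.Str.toList_lower, PySem.Str.toList_lower, PySem.Str.toList_slice, PySem.Str.toList_slice,
          PySem.Chars.slice_eq_listSlice, PySem.Chars.slice_eq_listSlice,
          PySem.List.slice_toNat _ (by omega) (by omega), PySem.List.slice_toNat _ (by omega) (by omega),
          ]
      simp only [PySem.Chars.lower]
      rw [← List.map_drop, List.drop_take, List.drop_drop]
      congr 2 <;> first | omega | (congr 1; omega)
    have hgh : pvBalanceKeywords.any (fun keyword =>
          (PySem.Str.find (PySem.Str.lower (PySem.Str.slice full_text (some (L+1)) (some start_pos))) keyword != -1 &&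
            decide (PySem.Str.find (PySem.Str.lower (PySem.Str.slice full_text (some (L+1)) (some start_pos))) keyword < start_pos - (L+1))))
        = pvBalanceKeywords.any (fun kw => PySem.Str.isIn kw (PySem.Str.lower (PySem.Str.slice full_text (some (L+1)) (some start_pos)))) := by
      apply pv_any_congr_mem
      intro kw hkw
      rw [PySem.Str.find_eq, PySem.Str.isIn_eq]
      exact pv_find_cond _ _ _ (pv_kw_ne_nil kw hkw) hlen
    have himp : pvBalanceKeywords.any (fun keyword => PySem.Str.isIn keyword
          (PySem.Str.lower (PySem.Str.slice full_text (some (start_pos - 50)) (some start_pos)))) = true →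
        pvBalanceKeywords.any (fun kw => PySem.Str.isIn kw
          (PySem.Str.lower (PySem.Str.slice full_text (some (L+1)) (some start_pos)))) = true := by
      intro hb
      rw [List.any_eq_true] at hb ⊢
      obtain ⟨kw, hkw, hkin⟩ := hb
      refine ⟨kw, hkw, ?_⟩
      rw [PySem.Str.isIn_eq] at hkin ⊢
      rw [hdrop] at hkin
      exact pv_isIn_of_isIn_drop _ _ _ hkin
    cases hb : pvBalanceKeywords.any (fun keyword => PySem.Str.isIn keyword
        (PySem.Str.lower (PySem.Str.slice full_text (some (start_pos - 50)) (some start_pos))))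
    · simp only [Bool.false_eq_true, if_false]
      exact hgh
    · simp only [if_true]
      exact (himp hb).symm
  · -- region is the 50-char window
    have hrs : max 0 (min (L + 1) (start_pos - 50)) = max 0 (start_pos - 50) := by omega
    rw [hrs, if_neg hcase]
    cases hb : pvBalanceKeywords.any (fun keyword => PySem.Str.isIn keyword
        (PySem.Str.lower (PySem.Str.slice full_text (some (max 0 (start_pos - 50))) (some start_pos)))) <;>
      simp

-- ===== VERDICT (by name: the statement is the Claim_ definition above) =====
theorem is_balance_amount_spec : Claim_equal_is_balance_amount := by
  intro text start_pos full_text _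
  unfold Spec_is_balance_amount
  exact is_balance_amount_eq_alt text start_pos full_text
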